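-- pv_equiv track=rewrite | github.com/Aasthaengg/IBMdataset | Python_codes/p03048/s051915469.py | solve
-- ===== SOURCE A (Python) =====
-- from itertools import product
--
-- def solve(R, G, B, N):
--     ans = 0
--     for r, g in product(range(3001), range(3001)):
--         v = N - R * r - G * g
--         b = v // B
--         if v >= 0 and B * b == v:
--             ans += 1
--     return ans
-- ===== SOURCE B (Python) =====
-- # B: per r, count valid g in O(1) via extended gcd (arithmetic-progression count) -- O(3001) instead of O(3001^2)
--
-- def egcd(a, b):
--     # extended Euclid: returns (g, x, y) with g = gcd(a, b) = a*x + b*y (for a, b >= 0)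
--     if b == 0:
--         return (a, 1, 0)
--     q = a // b
--     r = a % b
--     g, x, y = egcd(b, r)
--     return (g, y, x - q * y)
--
-- def count_g(G, m, t):
--     # number of g in [0, 3000] with G*g <= t and (t - G*g) % m == 0, where m = |B| > 0
--     if G == 0:
--         return 3001 if (t >= 0 and t % m == 0) else 0
--     aG = G if G > 0 else -G
--     d, x0, _ = egcd(aG, m)
--     if t % d != 0:
--         return 0
--     m1 = m // d
--     t1 = t // d
--     a = x0 * t1 if G > 0 else -(x0 * t1)
--     if G > 0:
--         lo, hi = 0, min(3000, t // G)
--     else: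
--         lo, hi = max(0, -(t // -G)), 3000
--     if hi < lo:
--         return 0
--     return (hi - a) // m1 - (lo - 1 - a) // m1
--
-- def solve(R, G, B, N):
--     m = B if B > 0 else -B
--     ans = 0
--     for r in range(3001):
--         ans += count_g(G, m, N - R * r)
--     return ans
-- ===== Notes on version B (the rewrite author's own statement) =====
-- stated objective: faster
-- what changed: A scans all 3001x3001 (r,g) pairs testing divisibility; B loops only over r and counts the valid g for each r in O(1) by solving the linear congruence G*g = N-R*r (mod |B|) with a hand-written extended Euclid and counting the resulting arithmetic progression inside [0,3000] with two floor divisions.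
import Mathlib
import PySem

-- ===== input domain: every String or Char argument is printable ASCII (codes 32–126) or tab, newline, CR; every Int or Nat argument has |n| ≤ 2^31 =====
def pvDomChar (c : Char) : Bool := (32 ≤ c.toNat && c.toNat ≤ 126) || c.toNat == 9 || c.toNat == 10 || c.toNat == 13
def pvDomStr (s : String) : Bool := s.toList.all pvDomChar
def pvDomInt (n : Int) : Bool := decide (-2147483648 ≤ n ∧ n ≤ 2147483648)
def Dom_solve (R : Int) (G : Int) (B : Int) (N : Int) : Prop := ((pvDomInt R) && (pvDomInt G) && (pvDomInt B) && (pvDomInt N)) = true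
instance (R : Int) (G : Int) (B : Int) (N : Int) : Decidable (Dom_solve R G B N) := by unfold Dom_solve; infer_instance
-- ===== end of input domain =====

-- B replaces A's 9-million-pair double loop by a single loop over r that counts the
-- valid g in O(1) via extended gcd (arithmetic-progression counting): asymptotically faster.

-- ===== PORT A =====
def solve (R : Int) (G : Int) (B : Int) (N : Int) : Int :=
  ((PySem.List.pyRange 0 3001 1).flatMap (fun r =>
      (PySem.List.pyRange 0 3001 1).map (fun g => (r, g)))).foldl
    (fun ans rg =>
      let v := N - R * rg.1 - G * rg.2
      let b := PySem.Int.floordiv v B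
      if 0 ≤ v ∧ B * b = v then ans + 1 else ans) 0

-- ===== PORT B =====
-- termination measure for the hand-written Euclid in Source B (Python '%' = PySem.Int.mod)
theorem natAbs_pymod_lt (a b : Int) (hb : b ≠ 0) : (PySem.Int.mod a b).natAbs < b.natAbs := by
  rcases lt_or_gt_of_ne hb with h | h
  · have := PySem.Int.mod_neg_bounds a h
    omega
  · have h1 := PySem.Int.mod_nonneg a h
    have h2 := PySem.Int.mod_lt a h
    omega

def egcd (a : Int) (b : Int) : Int × Int × Int :=
  if h : b = 0 then (a, 1, 0)
  else
    let q := PySem.Int.floordiv a b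
    let r := PySem.Int.mod a b
    let p := egcd b r
    (p.1, p.2.2, p.2.1 - q * p.2.2)
termination_by b.natAbs
decreasing_by simpa using natAbs_pymod_lt a b h

def countG (G : Int) (m : Int) (t : Int) : Int :=
  if G = 0 then (if 0 ≤ t ∧ PySem.Int.mod t m = 0 then 3001 else 0)
  else
    let aG := if 0 < G then G else -G
    let e := egcd aG m
    let d := e.1
    let x0 := e.2.1
    if PySem.Int.mod t d ≠ 0 then 0
    else
      let m1 := PySem.Int.floordiv m d
      let t1 := PySem.Int.floordiv t d
      let a := if 0 < G then x0 * t1 else -(x0 * t1)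
      let lo := if 0 < G then 0 else max 0 (-(PySem.Int.floordiv t (-G)))
      let hi := if 0 < G then min 3000 (PySem.Int.floordiv t G) else 3000
      if hi < lo then 0
      else PySem.Int.floordiv (hi - a) m1 - PySem.Int.floordiv (lo - 1 - a) m1

def solve_alt (R : Int) (G : Int) (B : Int) (N : Int) : Int :=
  let m := if 0 < B then B else -B
  (PySem.List.pyRange 0 3001 1).foldl (fun ans r => ans + countG G m (N - R * r)) 0

-- ===== PRECONDITION & SPEC =====
-- Pre_ excludes B = 0, on which A raises ZeroDivisionError (v // B).
def Pre_solve (R : Int) (G : Int) (B : Int) (N : Int) : Prop := B ≠ 0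
instance (R : Int) (G : Int) (B : Int) (N : Int) : Decidable (Pre_solve R G B N) := by unfold Pre_solve; infer_instance
def pvWitness_solve : Int × Int × Int × Int := (1, 1, 1, 5)

def Spec_solve (R : Int) (G : Int) (B : Int) (N : Int) (out : Int) : Prop := out = solve_alt R G B N
instance (R : Int) (G : Int) (B : Int) (N : Int) (out : Int) : Decidable (Spec_solve R G B N out) := by unfold Spec_solve; infer_instance

-- ===== CLAIM (what is proved, stated in full; the proofs are below) =====
def Claim_equal_solve : Prop := ∀ (R : Int) (G : Int) (B : Int) (N : Int), Dom_solve R G B N → Pre_solve R G B N → Spec_solve R G B N (solve R G B N)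

-- ===== LEMMAS AND PROOFS =====

-- b = v // B satisfies B * b == v exactly when B divides v
theorem mul_floordiv_eq_iff_dvd (Bv v : Int) (hB : Bv ≠ 0) :
    Bv * PySem.Int.floordiv v Bv = v ↔ Bv ∣ v := by
  constructor
  · intro h; exact ⟨PySem.Int.floordiv v Bv, h.symm⟩
  · rintro ⟨c, rfl⟩
    show Bv * (Bv * c).fdiv Bv = Bv * c
    rw [Int.mul_fdiv_cancel_left c hB]

-- the basic "one more element" step: floor((u)/m) - floor((u-1)/m) is the 0/1 indicator of m ∣ u
theorem fdiv_step (u m : Int) (hm : 0 < m) :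
    PySem.Int.floordiv u m - PySem.Int.floordiv (u - 1) m = if m ∣ u then 1 else 0 := by
  rw [PySem.Int.floordiv_eq_ediv_of_pos hm, PySem.Int.floordiv_eq_ediv_of_pos hm]
  have hu : u = m * (u / m) + u % m := (Int.mul_ediv_add_emod u m).symm
  have hs0 : 0 ≤ u % m := Int.emod_nonneg u (by omega)
  have hs1 : u % m < m := Int.emod_lt_of_pos u hm
  by_cases hd : m ∣ u
  · have hz : u % m = 0 := Int.emod_eq_zero_of_dvd hd
    have h1 : (u - 1) / m = u / m - 1 := by
      have : u - 1 = (m - 1) + (u / m - 1) * m := by linear_combination hu + hz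
      rw [this, Int.add_mul_ediv_right _ _ (by omega : m ≠ 0),
        Int.ediv_eq_zero_of_lt (by omega) (by omega)]
      ring
    simp [hd, h1]
  · have hz : u % m ≠ 0 := fun h => hd (Int.dvd_of_emod_eq_zero h)
    have h1 : (u - 1) / m = u / m := by
      have : u - 1 = (u % m - 1) + (u / m) * m := by linear_combination hu
      rw [this, Int.add_mul_ediv_right _ _ (by omega : m ≠ 0),
        Int.ediv_eq_zero_of_lt (by omega) (by omega)]
      ring
    simp [hd, h1]

-- extended Euclid: the hand-written egcd returns (gcd, Bezout coefficients)
theorem egcd_spec (a b : Int) : 0 ≤ a → 0 ≤ b →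
    (egcd a b).1 = Int.gcd a b ∧ a * (egcd a b).2.1 + b * (egcd a b).2.2 = (egcd a b).1 := by
  fun_induction egcd a b with
  | case1 a =>
    intro ha _
    refine ⟨?_, by ring⟩
    simp only [Int.gcd]
    simp
    exact (abs_of_nonneg ha).symm
  | case2 a b hb q r p ih =>
    intro ha hb0
    have hbpos : 0 < b := lt_of_le_of_ne hb0 (Ne.symm hb)
    have hr0 : 0 ≤ r := PySem.Int.mod_nonneg a hbpos
    obtain ⟨ih1, ih2⟩ := ih hb0 hr0
    have hqr : q * b + r = a := PySem.Int.floordiv_mul_add_mod a b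
    have hgcd : Int.gcd b r = Int.gcd a b := by
      have h1 : Int.gcd b (r + b * q) = Int.gcd b r := Int.gcd_add_mul_left_right b r q
      rw [show r + b * q = a by linarith] at h1
      rw [← h1, Int.gcd_comm]
    constructor
    · show (egcd b r).1 = _
      rw [ih1, hgcd]
    · show a * (egcd b r).2.2 + b * ((egcd b r).2.1 - q * (egcd b r).2.2) = (egcd b r).1
      linear_combination ih2 - (egcd b r).2.2 * hqr

-- linear congruence: with Bezout data for (aG, m), membership of t - aG*g in mℤ is an AP condition on g
theorem cong_iff (aG m d m1 x0 y0 t t1 g : Int)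
    (hd : 0 < d) (hdm : m = d * m1) (hdaG : d ∣ aG) (hdt : t = d * t1)
    (hbez : aG * x0 + m * y0 = d) :
    (m ∣ t - aG * g) ↔ (m1 ∣ g - x0 * t1) := by
  obtain ⟨aG', haG'⟩ := hdaG
  have h1 : aG' * x0 + m1 * y0 = 1 := by
    have : d * (aG' * x0 + m1 * y0) = d * 1 := by
      subst haG' hdm; ring_nf; ring_nf at hbez; linarith [hbez]
    exact mul_left_cancel₀ (by omega) this
  have key : t - aG * g = d * (t1 - aG' * g) := by subst haG' hdt; ring
  rw [key, hdm, mul_dvd_mul_iff_left (by omega : d ≠ 0)]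
  constructor
  · rintro ⟨k, hk⟩
    exact ⟨y0 * g - x0 * k, by linear_combination (-x0) * hk - g * h1⟩
  · rintro ⟨k, hk⟩
    exact ⟨y0 * t1 - aG' * k, by linear_combination (-aG') * hk - t1 * h1⟩

theorem no_sol (aG m d t g : Int) (hdm : d ∣ m) (hdaG : d ∣ aG) (hndt : ¬ d ∣ t) :
    ¬ (m ∣ t - aG * g) := by
  intro h
  exact hndt (by
    have h1 : d ∣ t - aG * g := dvd_trans hdm h
    have h2 : d ∣ aG * g := hdaG.mul_right g
    have := dvd_add h1 h2
    simpa using this)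

-- counting an arithmetic progression inside [lo, hi] ∩ [0, n): closed form by floors
theorem countP_interval (m1 a lo hi : Int) (hm1 : 0 < m1) (hlo : 0 ≤ lo) (n : Nat) :
    ((((List.range n).map (fun (k : Nat) => (k : Int))).countP
        (fun k => decide (lo ≤ k ∧ k ≤ hi ∧ m1 ∣ (k - a)))) : Int)
    = if lo ≤ min hi ((n : Int) - 1)
      then PySem.Int.floordiv (min hi ((n : Int) - 1) - a) m1 - PySem.Int.floordiv (lo - 1 - a) m1
      else 0 := by
  induction n with
  | zero =>
    simp only [List.range_zero, List.map_nil, List.countP_nil]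
    rw [if_neg (by omega)]
    simp
  | succ n ih =>
    rw [List.range_succ, List.map_append, List.countP_append, List.map_singleton,
      List.countP_singleton]
    push_cast
    rw [ih]
    have hcast : (n : Int) + 1 - 1 = (n : Int) := by ring
    rw [hcast]
    simp only [decide_eq_true_eq]
    have hstep := fdiv_step ((n : Int) - a) m1 hm1
    have hsub : (n : Int) - a - 1 = (n : Int) - 1 - a := by ring
    rw [hsub] at hstep
    by_cases h1 : lo ≤ (n : Int)
    · by_cases h2 : (n : Int) ≤ hi
      · have e1 : min hi ((n : Int)) = (n : Int) := by omega
        have e2 : min hi ((n : Int) - 1) = (n : Int) - 1 := by omega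
        rw [e1, e2]
        by_cases hd : m1 ∣ ((n : Int) - a)
        · rw [if_pos hd] at hstep
          rw [if_pos (⟨h1, h2, hd⟩ : lo ≤ (n : Int) ∧ (n : Int) ≤ hi ∧ m1 ∣ ((n : Int) - a))]
          split_ifs with hA
          · omega
          · rw [show lo - 1 - a = (n : Int) - 1 - a by omega]
            omega
        · rw [if_neg hd] at hstep
          rw [if_neg (fun hc : lo ≤ (n : Int) ∧ (n : Int) ≤ hi ∧ m1 ∣ ((n : Int) - a) => hd hc.2.2)]
          split_ifs with hA
          · omega
          · rw [show lo - 1 - a = (n : Int) - 1 - a by omega]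
            omega
      · have h2' : hi < (n : Int) := not_le.mp h2
        have e1 : min hi ((n : Int)) = min hi ((n : Int) - 1) := by omega
        rw [e1, if_neg (fun hc : lo ≤ (n : Int) ∧ (n : Int) ≤ hi ∧ m1 ∣ ((n : Int) - a) => h2 hc.2.1)]
        split_ifs <;> omega
    · have h1' : (n : Int) < lo := not_le.mp h1
      rw [if_neg (fun hc : lo ≤ (n : Int) ∧ (n : Int) ≤ hi ∧ m1 ∣ ((n : Int) - a) => h1 hc.1)]
      split_ifs <;> omega

-- the inner loop of A, for one fixed r, equals B's O(1) count
theorem inner_eq (Bv G t : Int) (hB : Bv ≠ 0) :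
    (((PySem.List.pyRange 0 3001 1).countP
        (fun g => decide (0 ≤ t - G * g ∧
          Bv * PySem.Int.floordiv (t - G * g) Bv = t - G * g))) : Int)
    = countG G (if 0 < Bv then Bv else -Bv) t := by
  set m : Int := if 0 < Bv then Bv else -Bv with hmdef
  have hm : 0 < m := by rw [hmdef]; split_ifs with h <;> omega
  have hdvd_iff : ∀ v : Int, (Bv * PySem.Int.floordiv v Bv = v) ↔ (m ∣ v) := by
    intro v
    rw [mul_floordiv_eq_iff_dvd Bv v hB, hmdef]
    split_ifs with h
    · exact Iff.rfl
    · exact (Int.neg_dvd).symm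
  have hA : (PySem.List.pyRange 0 3001 1).countP
      (fun g => decide (0 ≤ t - G * g ∧
        Bv * PySem.Int.floordiv (t - G * g) Bv = t - G * g))
      = (PySem.List.pyRange 0 3001 1).countP
      (fun g => decide (0 ≤ t - G * g ∧ m ∣ (t - G * g))) := by
    apply List.countP_congr
    intro g _
    simp only [decide_eq_true_eq]
    exact and_congr_right (fun _ => hdvd_iff (t - G * g))
  rw [hA]
  unfold countG
  by_cases hG0 : G = 0
  · subst hG0
    rw [if_pos rfl]
    by_cases hc : (0 ≤ t ∧ m ∣ t)
    · rw [if_pos ⟨hc.1, (PySem.Int.mod_eq_zero_iff_dvd t m).mpr hc.2⟩]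
      have hlen : (PySem.List.pyRange 0 3001 1).countP
          (fun g => decide (0 ≤ t - 0 * g ∧ m ∣ (t - 0 * g)))
          = (PySem.List.pyRange 0 3001 1).length := by
        rw [List.countP_eq_length]
        intro g _
        simp only [decide_eq_true_eq]
        simpa using hc
      rw [hlen, PySem.List.length_pyRange_one]
      rfl
    · rw [if_neg (fun h => hc ⟨h.1, (PySem.Int.mod_eq_zero_iff_dvd t m).mp h.2⟩)]
      have hz : (PySem.List.pyRange 0 3001 1).countP
          (fun g => decide (0 ≤ t - 0 * g ∧ m ∣ (t - 0 * g))) = 0 := by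
        rw [List.countP_eq_zero]
        intro g _
        simp only [decide_eq_true_eq]
        intro h
        exact hc (by simpa using h)
      rw [hz]
      rfl
  · rw [if_neg hG0]
    by_cases hGpos : 0 < G
    · simp only [if_pos hGpos]
      obtain ⟨hg1, hg2⟩ := egcd_spec G m (le_of_lt hGpos) (le_of_lt hm)
      have hdpos : 0 < (egcd G m).1 := by
        rw [hg1]
        have : Int.gcd G m ≠ 0 := fun h => hG0 (Int.gcd_eq_zero_iff.mp h).1
        exact_mod_cast Nat.pos_of_ne_zero this
      have hdm : (egcd G m).1 ∣ m := by rw [hg1]; exact Int.gcd_dvd_right G m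
      have hdG : (egcd G m).1 ∣ G := by rw [hg1]; exact Int.gcd_dvd_left G m
      by_cases hdt : (egcd G m).1 ∣ t
      · rw [if_neg (not_not_intro ((PySem.Int.mod_eq_zero_iff_dvd t (egcd G m).1).mpr hdt))]
        have hm1 : m = (egcd G m).1 * PySem.Int.floordiv m (egcd G m).1 := by
          rw [PySem.Int.floordiv_eq_ediv_of_pos hdpos]
          exact (Int.mul_ediv_cancel' hdm).symm
        have ht1 : t = (egcd G m).1 * PySem.Int.floordiv t (egcd G m).1 := by
          rw [PySem.Int.floordiv_eq_ediv_of_pos hdpos]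
          exact (Int.mul_ediv_cancel' hdt).symm
        have hm1pos : 0 < PySem.Int.floordiv m (egcd G m).1 := by nlinarith [hm, hm1, hdpos]
        have hcong : ∀ g : Int, (m ∣ t - G * g) ↔
            (PySem.Int.floordiv m (egcd G m).1 ∣
              g - (egcd G m).2.1 * PySem.Int.floordiv t (egcd G m).1) := fun g =>
          cong_iff G m (egcd G m).1 _ (egcd G m).2.1 (egcd G m).2.2 t _ g hdpos hm1 hdG ht1 hg2
        have hB2 : (PySem.List.pyRange 0 3001 1).countP
            (fun g => decide (0 ≤ t - G * g ∧ m ∣ (t - G * g)))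
            = (PySem.List.pyRange 0 3001 1).countP
            (fun g => decide ((0 : Int) ≤ g ∧ g ≤ min 3000 (PySem.Int.floordiv t G) ∧
              PySem.Int.floordiv m (egcd G m).1 ∣
                (g - (egcd G m).2.1 * PySem.Int.floordiv t (egcd G m).1))) := by
          apply List.countP_congr
          intro g hg
          have hgr := PySem.List.mem_pyRange_one.mp hg
          simp only [decide_eq_true_eq]
          have hb := PySem.Int.le_floordiv_iff_mul_le (a := t) (b := G) (q := g) hGpos
          have hcomm : g * G = G * g := by ring
          constructor
          · rintro ⟨h1, h2⟩
            have hgle : g ≤ PySem.Int.floordiv t G := hb.mpr (by omega)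
            exact ⟨by omega, by omega, (hcong g).mp h2⟩
          · rintro ⟨h1, h2, h3⟩
            have := hb.mp (by omega)
            exact ⟨by omega, (hcong g).mpr h3⟩
        rw [hB2, PySem.List.pyRange_one]
        simp only [zero_add, Int.sub_zero]
        rw [show ((3001 : Int)).toNat = 3001 from rfl]
        rw [countP_interval _ _ 0 _ hm1pos le_rfl 3001]
        have hmin : min (min 3000 (PySem.Int.floordiv t G)) (((3001 : Nat) : Int) - 1)
            = min 3000 (PySem.Int.floordiv t G) := by
          push_cast
          omega
        rw [hmin]
        split_ifs <;> push_cast <;> omega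
      · rw [if_pos ((PySem.Int.mod_eq_zero_iff_dvd t (egcd G m).1).not.mpr hdt)]
        have hz : (PySem.List.pyRange 0 3001 1).countP
            (fun g => decide (0 ≤ t - G * g ∧ m ∣ (t - G * g))) = 0 := by
          rw [List.countP_eq_zero]
          intro g _
          simp only [decide_eq_true_eq]
          rintro ⟨-, h2⟩
          exact no_sol G m (egcd G m).1 t g hdm hdG hdt h2
        rw [hz]
        rfl
    · simp only [if_neg hGpos]
      have hGneg : G < 0 := by omega
      have hnGpos : 0 < -G := by omega
      obtain ⟨hg1, hg2⟩ := egcd_spec (-G) m (by omega) (le_of_lt hm)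
      have hdpos : 0 < (egcd (-G) m).1 := by
        rw [hg1]
        have : Int.gcd (-G) m ≠ 0 := fun h => hG0 (by
          have := (Int.gcd_eq_zero_iff.mp h).1
          omega)
        exact_mod_cast Nat.pos_of_ne_zero this
      have hdm : (egcd (-G) m).1 ∣ m := by rw [hg1]; exact Int.gcd_dvd_right (-G) m
      have hdG : (egcd (-G) m).1 ∣ -G := by rw [hg1]; exact Int.gcd_dvd_left (-G) m
      by_cases hdt : (egcd (-G) m).1 ∣ t
      · rw [if_neg (not_not_intro ((PySem.Int.mod_eq_zero_iff_dvd t (egcd (-G) m).1).mpr hdt))]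
        have hm1 : m = (egcd (-G) m).1 * PySem.Int.floordiv m (egcd (-G) m).1 := by
          rw [PySem.Int.floordiv_eq_ediv_of_pos hdpos]
          exact (Int.mul_ediv_cancel' hdm).symm
        have ht1 : t = (egcd (-G) m).1 * PySem.Int.floordiv t (egcd (-G) m).1 := by
          rw [PySem.Int.floordiv_eq_ediv_of_pos hdpos]
          exact (Int.mul_ediv_cancel' hdt).symm
        have hm1pos : 0 < PySem.Int.floordiv m (egcd (-G) m).1 := by nlinarith [hm, hm1, hdpos]
        have hcong : ∀ g : Int, (m ∣ t - G * g) ↔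
            (PySem.Int.floordiv m (egcd (-G) m).1 ∣
              g - -((egcd (-G) m).2.1 * PySem.Int.floordiv t (egcd (-G) m).1)) := by
          intro g
          have h1 : t - G * g = t - (-G) * (-g) := by ring
          rw [h1, cong_iff (-G) m (egcd (-G) m).1 _ (egcd (-G) m).2.1 (egcd (-G) m).2.2 t _ (-g)
            hdpos hm1 hdG ht1 hg2]
          rw [show -g - (egcd (-G) m).2.1 * PySem.Int.floordiv t (egcd (-G) m).1
              = -(g - -((egcd (-G) m).2.1 * PySem.Int.floordiv t (egcd (-G) m).1)) by ring,
            Int.dvd_neg]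
        have hB2 : (PySem.List.pyRange 0 3001 1).countP
            (fun g => decide (0 ≤ t - G * g ∧ m ∣ (t - G * g)))
            = (PySem.List.pyRange 0 3001 1).countP
            (fun g => decide (max 0 (-(PySem.Int.floordiv t (-G))) ≤ g ∧ (g : Int) ≤ 3000 ∧
              PySem.Int.floordiv m (egcd (-G) m).1 ∣
                (g - -((egcd (-G) m).2.1 * PySem.Int.floordiv t (egcd (-G) m).1)))) := by
          apply List.countP_congr
          intro g hg
          have hgr := PySem.List.mem_pyRange_one.mp hg
          simp only [decide_eq_true_eq]
          have hb := PySem.Int.le_floordiv_iff_mul_le (a := t) (b := -G) (q := -g) hnGpos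
          have hcomm : -g * -G = G * g := by ring
          constructor
          · rintro ⟨h1, h2⟩
            have : -g ≤ PySem.Int.floordiv t (-G) := hb.mpr (by omega)
            exact ⟨by omega, by omega, (hcong g).mp h2⟩
          · rintro ⟨h1, h2, h3⟩
            have := hb.mp (by omega)
            exact ⟨by omega, (hcong g).mpr h3⟩
        rw [hB2, PySem.List.pyRange_one]
        simp only [zero_add, Int.sub_zero]
        rw [show ((3001 : Int)).toNat = 3001 from rfl]
        rw [countP_interval _ _ _ _ hm1pos (le_max_left 0 _) 3001]
        have hmin : min (3000 : Int) (((3001 : Nat) : Int) - 1) = 3000 := by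
          push_cast
          omega
        rw [hmin]
        split_ifs <;> push_cast <;> omega
      · rw [if_pos ((PySem.Int.mod_eq_zero_iff_dvd t (egcd (-G) m).1).not.mpr hdt)]
        have hz : (PySem.List.pyRange 0 3001 1).countP
            (fun g => decide (0 ≤ t - G * g ∧ m ∣ (t - G * g))) = 0 := by
          rw [List.countP_eq_zero]
          intro g _
          simp only [decide_eq_true_eq]
          rintro ⟨-, h2⟩
          exact no_sol (-G) m (egcd (-G) m).1 t (-g) hdm hdG hdt (by
            rw [show t - -G * -g = t - G * g by ring]
            exact h2)
        rw [hz]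
        rfl

-- ===== VERDICT (by name: the statement is the Claim_ definition above) =====
theorem solve_spec : Claim_equal_solve := by
  intro R G B N _ hB
  unfold Spec_solve solve solve_alt
  rw [List.foldl_flatMap]
  apply PySem.List.foldl_congr_mem
  intro acc r _
  rw [List.foldl_map]
  have hc := PySem.List.foldl_count_if
      (fun g => decide (0 ≤ N - R * r - G * g ∧
        B * PySem.Int.floordiv (N - R * r - G * g) B = N - R * r - G * g))
      (PySem.List.pyRange 0 3001 1) acc
  simp only [decide_eq_true_eq] at hc
  rw [hc, inner_eq B G (N - R * r) hB]
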